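-- pv_equiv track=rewrite | github.com/shriram7057/GFG-POTD-Mastery | Optimal Strategy For A Game.py | maximumAmount
-- ===== SOURCE A (Python) =====
-- def maximumAmount(arr):
--     # code here
--     n=len(arr)
--     dp = [[0]*n for _ in range(n)]
--
--     for i in range(n):
--         dp[i][i] = arr[i]
--
--     for i in range(n-1):
--         dp[i][i+1] = max(arr[i],arr[i+1])
--     for length in range(3, n+1):
--         for i in range(n-length+1):
--             j = i + length - 1
--
--             a=dp[i+2][j] if i+2 <= j else 0
--             b=dp[i+1][j-1] if i+1 <= j-1 else 0
--             c=dp[i][j-2] if i <= j-2 else 0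
--
--             take_i =arr[i] + min(dp[i+2][j] if i+2 <= j else 0,
--                                  dp[i+1][j-1] if i+1 <= j-1 else 0)
--             take_j = arr[j] + min(dp[i+1][j-1] if i+1 <= j-1 else 0,
--                                   dp[i][j-2] if i<= j-2 else 0)
--             dp[i][j] = max(take_i, take_j)
--     return dp[0][n-1]
-- ===== SOURCE B (Python) =====
-- from functools import lru_cache
--
-- def maximumAmount(arr):
--     @lru_cache(maxsize=None)
--     def solve(i, j):
--         if i > j:
--             return 0
--         if i == j:
--             return arr[i]
--         take_i = arr[i] + min(solve(i + 2, j), solve(i + 1, j - 1))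
--         take_j = arr[j] + min(solve(i + 1, j - 1), solve(i, j - 2))
--         return max(take_i, take_j)
--     return solve(0, len(arr) - 1)
-- ===== Notes on version B (the rewrite author's own statement) =====
-- stated objective: alternative
-- what changed: Replaces the bottom-up length-by-length DP table (seeded length-1 and length-2 rows, then a triple loop) with a top-down memoized recursion solve(i,j) over sub-intervals with unified base cases, returning solve(0, n-1).
import Mathlib
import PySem

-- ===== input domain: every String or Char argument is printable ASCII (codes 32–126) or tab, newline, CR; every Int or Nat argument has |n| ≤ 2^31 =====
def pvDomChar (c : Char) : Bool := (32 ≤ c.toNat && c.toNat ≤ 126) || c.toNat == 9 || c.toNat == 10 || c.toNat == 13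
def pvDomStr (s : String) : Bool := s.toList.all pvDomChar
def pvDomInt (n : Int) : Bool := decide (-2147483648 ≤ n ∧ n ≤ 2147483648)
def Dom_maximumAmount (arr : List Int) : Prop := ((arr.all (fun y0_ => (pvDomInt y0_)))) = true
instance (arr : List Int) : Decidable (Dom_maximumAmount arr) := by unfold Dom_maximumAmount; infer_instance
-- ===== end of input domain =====

-- B replaces A's bottom-up length-by-length DP table with a top-down memoized recursion over
-- sub-intervals (same recurrence, opposite traversal direction); same asymptotic cost.


-- ===== PORT A =====
-- The 2-D list dp is ported as a finite table PySem.Dict keyed by (i, j) with default 0 — the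
-- Python zero matrix: an entry never assigned reads 0, an assignment dp[i][j] = v is insert.
-- All reads arr[i] are in range on Pre_ inputs, so arr[i] is pyGetD arr i 0 (exact there).
-- Python's unused locals a, b, c are the very subexpressions reused inside take_i/take_j.

-- for i in range(n): dp[i][i] = arr[i]
def pvStage1 (arr : List Int) : PySem.Dict (Int × Int) Int :=
  (PySem.List.pyRange 0 (arr.length : Int) 1).foldl
    (fun dp i => dp.insert (i, i) (PySem.List.pyGetD arr i 0)) PySem.Dict.empty

-- for i in range(n-1): dp[i][i+1] = max(arr[i], arr[i+1])
def pvStage2 (arr : List Int) : PySem.Dict (Int × Int) Int :=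
  (PySem.List.pyRange 0 ((arr.length : Int) - 1) 1).foldl
    (fun dp i => dp.insert (i, i + 1)
      (max (PySem.List.pyGetD arr i 0) (PySem.List.pyGetD arr (i + 1) 0))) (pvStage1 arr)

-- the body of the inner loop over i (length fixed)
def pvStep (arr : List Int) (len : Int) (dp : PySem.Dict (Int × Int) Int) (i : Int) :
    PySem.Dict (Int × Int) Int :=
  let j := i + len - 1
  let takeI := PySem.List.pyGetD arr i 0 +
    min (if i + 2 ≤ j then dp.getD (i + 2, j) 0 else 0)
        (if i + 1 ≤ j - 1 then dp.getD (i + 1, j - 1) 0 else 0)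
  let takeJ := PySem.List.pyGetD arr j 0 +
    min (if i + 1 ≤ j - 1 then dp.getD (i + 1, j - 1) 0 else 0)
        (if i ≤ j - 2 then dp.getD (i, j - 2) 0 else 0)
  dp.insert (i, j) (max takeI takeJ)

-- for length in range(3, n+1): for i in range(n-length+1): …
def pvStage3 (arr : List Int) : PySem.Dict (Int × Int) Int :=
  (PySem.List.pyRange 3 ((arr.length : Int) + 1) 1).foldl
    (fun dp len =>
      (PySem.List.pyRange 0 ((arr.length : Int) - len + 1) 1).foldl (pvStep arr len) dp)
    (pvStage2 arr)

def maximumAmount (arr : List Int) : Int :=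
  (pvStage3 arr).getD (0, (arr.length : Int) - 1) 0

-- ===== PORT B =====
-- Source B's memoized solve(i, j); memoization only caches, so it is ported as the plain recursion.
def pvSolve (arr : List Int) (i j : Int) : Int :=
  if _h : i > j then 0
  else if _h2 : i = j then PySem.List.pyGetD arr i 0
  else
    max (PySem.List.pyGetD arr i 0 +
          min (pvSolve arr (i + 2) j) (pvSolve arr (i + 1) (j - 1)))
        (PySem.List.pyGetD arr j 0 +
          min (pvSolve arr (i + 1) (j - 1)) (pvSolve arr i (j - 2)))
termination_by (j + 1 - i).toNat
decreasing_by all_goals omega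

def maximumAmount_alt (arr : List Int) : Int :=
  pvSolve arr 0 ((arr.length : Int) - 1)

-- ===== PRECONDITION & SPEC =====
-- Pre_ excludes only the empty list, on which Python A raises IndexError (dp[0] of an empty table).
def Pre_maximumAmount (arr : List Int) : Prop := arr ≠ []
instance (arr : List Int) : Decidable (Pre_maximumAmount arr) := by
  unfold Pre_maximumAmount; infer_instance

def pvWitness_maximumAmount : List Int := [5, 3, 7, 10]

def Spec_maximumAmount (arr : List Int) (out : Int) : Prop := out = maximumAmount_alt arr
instance (arr : List Int) (out : Int) : Decidable (Spec_maximumAmount arr out) := by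
  unfold Spec_maximumAmount; infer_instance

-- ===== CLAIM (what is proved, stated in full; the proofs are below) =====
def Claim_equal_maximumAmount : Prop :=
  ∀ (arr : List Int), Dom_maximumAmount arr → Pre_maximumAmount arr →
    Spec_maximumAmount arr (maximumAmount arr)

-- ===== LEMMAS AND PROOFS =====

-- dp agrees with pvSolve on all in-range intervals of length ≤ L
def pvInv (arr : List Int) (L : Int) (dp : PySem.Dict (Int × Int) Int) : Prop :=
  ∀ i j : Int, 0 ≤ i → i ≤ j → j < (arr.length : Int) → j - i + 1 ≤ L →
    dp.getD (i, j) 0 = pvSolve arr i j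

theorem pvSolve_gt (arr : List Int) (i j : Int) (h : i > j) : pvSolve arr i j = 0 := by
  rw [pvSolve]; simp [h]

theorem pvSolve_diag (arr : List Int) (i : Int) : pvSolve arr i i = PySem.List.pyGetD arr i 0 := by
  rw [pvSolve]; simp

theorem pvSolve_pair (arr : List Int) (i : Int) :
    pvSolve arr i (i + 1) = max (PySem.List.pyGetD arr i 0) (PySem.List.pyGetD arr (i + 1) 0) := by
  rw [pvSolve]
  have h1 : ¬ i > i + 1 := by omega
  have h2 : ¬ i = i + 1 := by omega
  rw [dif_neg h1, dif_neg h2,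
      pvSolve_gt arr (i + 2) (i + 1) (by omega),
      pvSolve_gt arr (i + 1) (i + 1 - 1) (by omega),
      pvSolve_gt arr i (i + 1 - 2) (by omega)]
  simp

theorem pvSolve_rec (arr : List Int) (i j : Int) (h : i < j) :
    pvSolve arr i j =
      max (PySem.List.pyGetD arr i 0 +
            min (pvSolve arr (i + 2) j) (pvSolve arr (i + 1) (j - 1)))
          (PySem.List.pyGetD arr j 0 +
            min (pvSolve arr (i + 1) (j - 1)) (pvSolve arr i (j - 2))) := by
  rw [pvSolve]
  rw [dif_neg (by omega : ¬ i > j), dif_neg (by omega : ¬ i = j)]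

theorem pvFold1 (g : Int → Int) (l : List Int) (dp : PySem.Dict (Int × Int) Int) (x y : Int) :
    (l.foldl (fun dp i => dp.insert (i, i) (g i)) dp).getD (x, y) 0 =
      if x = y ∧ x ∈ l then g x else dp.getD (x, y) 0 := by
  induction l generalizing dp with
  | nil => simp
  | cons a l ih =>
    rw [List.foldl_cons, ih]
    rw [PySem.Dict.getD_insert]
    simp only [List.mem_cons, Prod.mk.injEq]
    by_cases hxy : x = y
    · subst hxy
      by_cases hxl : x ∈ l
      · simp [hxl]
      · by_cases hxa : x = a
        · subst hxa; simp [hxl]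
        · simp [hxl, hxa]
    · rw [if_neg (fun hc => hxy hc.1), if_neg (fun hc => hxy (hc.1.trans hc.2.symm)),
          if_neg (fun hc => hxy hc.1)]

theorem pvFold2 (g : Int → Int) (l : List Int) (dp : PySem.Dict (Int × Int) Int) (x y : Int) :
    (l.foldl (fun dp i => dp.insert (i, i + 1) (g i)) dp).getD (x, y) 0 =
      if y = x + 1 ∧ x ∈ l then g x else dp.getD (x, y) 0 := by
  induction l generalizing dp with
  | nil => simp
  | cons a l ih =>
    rw [List.foldl_cons, ih]
    rw [PySem.Dict.getD_insert]
    simp only [List.mem_cons, Prod.mk.injEq]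
    by_cases hxy : y = x + 1
    · subst hxy
      by_cases hxl : x ∈ l
      · simp [hxl]
      · by_cases hxa : x = a
        · subst hxa; simp [hxl]
        · simp [hxl, hxa]
    · rw [if_neg (fun hc => hxy hc.1), if_neg (fun hc => hxy (by omega : y = x + 1)),
          if_neg (fun hc => hxy hc.1)]

theorem pvStage2_inv (arr : List Int) : pvInv arr 2 (pvStage2 arr) := by
  intro i j hi hij hjn hlen
  have hcase : j = i ∨ j = i + 1 := by omega
  unfold pvStage2
  rw [pvFold2]
  rcases hcase with h | h
  · rw [h]
    rw [if_neg (by omega : ¬ (i = i + 1 ∧ i ∈ PySem.List.pyRange 0 ((arr.length : Int) - 1) 1))]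
    unfold pvStage1
    rw [pvFold1, if_pos ⟨rfl, by rw [PySem.List.mem_pyRange_one]; omega⟩, pvSolve_diag]
  · rw [h]
    rw [if_pos ⟨rfl, by rw [PySem.List.mem_pyRange_one]; omega⟩, pvSolve_pair]

theorem pvStep_value (arr : List Int) (len i : Int) (dp : PySem.Dict (Int × Int) Int)
    (hL : 3 ≤ len) (hInv : pvInv arr (len - 1) dp) (hi : 0 ≤ i)
    (hj : i + len - 1 < (arr.length : Int)) :
    (pvStep arr len dp i).getD (i, i + len - 1) 0 = pvSolve arr i (i + len - 1) := by
  unfold pvStep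
  rw [PySem.Dict.getD_insert, if_pos rfl]
  rw [if_pos (by omega : i + 2 ≤ i + len - 1),
      if_pos (by omega : i + 1 ≤ i + len - 1 - 1),
      if_pos (by omega : i ≤ i + len - 1 - 2)]
  rw [hInv (i + 2) (i + len - 1) (by omega) (by omega) (by omega) (by omega),
      hInv (i + 1) (i + len - 1 - 1) (by omega) (by omega) (by omega) (by omega),
      hInv i (i + len - 1 - 2) (by omega) (by omega) (by omega) (by omega)]
  rw [pvSolve_rec arr i (i + len - 1) (by omega)]

theorem pvStep_short (arr : List Int) (len i : Int) (dp : PySem.Dict (Int × Int) Int)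
    (hInv : pvInv arr (len - 1) dp) : pvInv arr (len - 1) (pvStep arr len dp i) := by
  intro x y hx hxy hyn hl
  unfold pvStep
  rw [PySem.Dict.getD_insert, if_neg (by simp only [Prod.mk.injEq]; omega : ¬ ((x, y) = (i, i + len - 1)))]
  exact hInv x y hx hxy hyn hl

theorem pvFoldInner (arr : List Int) (len : Int) (hL : 3 ≤ len) :
    ∀ (l : List Int) (dp : PySem.Dict (Int × Int) Int),
      (∀ x ∈ l, 0 ≤ x ∧ x + len - 1 < (arr.length : Int)) →
      pvInv arr (len - 1) dp →
      pvInv arr (len - 1) (l.foldl (pvStep arr len) dp) ∧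
      (∀ x : Int, 0 ≤ x → x + len - 1 < (arr.length : Int) →
        (x ∈ l ∨ dp.getD (x, x + len - 1) 0 = pvSolve arr x (x + len - 1)) →
        (l.foldl (pvStep arr len) dp).getD (x, x + len - 1) 0 = pvSolve arr x (x + len - 1)) := by
  intro l
  induction l with
  | nil =>
    intro dp _ hInv
    refine ⟨hInv, fun x hx hxn hc => ?_⟩
    rcases hc with hc | hc
    · exact absurd hc (List.not_mem_nil)
    · exact hc
  | cons a l ih =>
    intro dp hbd hInv
    have ha := hbd a (List.mem_cons_self)
    have hInv' : pvInv arr (len - 1) (pvStep arr len dp a) := pvStep_short arr len a dp hInv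
    have hbd' : ∀ x ∈ l, 0 ≤ x ∧ x + len - 1 < (arr.length : Int) :=
      fun x hx => hbd x (List.mem_cons_of_mem a hx)
    obtain ⟨ih1, ih2⟩ := ih (pvStep arr len dp a) hbd' hInv'
    rw [List.foldl_cons]
    refine ⟨ih1, fun x hx hxn hc => ?_⟩
    rcases hc with hc | hc
    · rcases List.mem_cons.mp hc with hxa | hxl
      · subst hxa
        exact ih2 x hx hxn (Or.inr (pvStep_value arr len x dp hL hInv hx hxn))
      · exact ih2 x hx hxn (Or.inl hxl)
    · refine ih2 x hx hxn (Or.inr ?_)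
      by_cases hxa : x = a
      · subst hxa
        exact pvStep_value arr len x dp hL hInv hx hxn
      · unfold pvStep
        rw [PySem.Dict.getD_insert,
            if_neg (by simp only [Prod.mk.injEq]; omega : ¬ ((x, x + len - 1) = (a, a + len - 1)))]
        exact hc

theorem pvInnerInv (arr : List Int) (len : Int) (dp : PySem.Dict (Int × Int) Int)
    (hL : 3 ≤ len) (hInv : pvInv arr (len - 1) dp) :
    pvInv arr len
      ((PySem.List.pyRange 0 ((arr.length : Int) - len + 1) 1).foldl (pvStep arr len) dp) := by
  have hbd : ∀ x ∈ PySem.List.pyRange 0 ((arr.length : Int) - len + 1) 1,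
      0 ≤ x ∧ x + len - 1 < (arr.length : Int) := by
    intro x hx
    rw [PySem.List.mem_pyRange_one] at hx
    omega
  obtain ⟨h1, h2⟩ := pvFoldInner arr len hL _ dp hbd hInv
  intro i j hi hij hjn hlen
  by_cases hsh : j - i + 1 ≤ len - 1
  · exact h1 i j hi hij hjn hsh
  · have hj : j = i + len - 1 := by omega
    subst hj
    exact h2 i hi (by omega)
      (Or.inl (by rw [PySem.List.mem_pyRange_one]; omega))

theorem pvOuter (arr : List Int) :
    ∀ (k : Nat) (a : Int) (dp : PySem.Dict (Int × Int) Int), 3 ≤ a → pvInv arr (a - 1) dp →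
      pvInv arr (a - 1 + k)
        ((PySem.List.pyRange a (a + k) 1).foldl
          (fun dp len =>
            (PySem.List.pyRange 0 ((arr.length : Int) - len + 1) 1).foldl (pvStep arr len) dp)
          dp) := by
  intro k
  induction k with
  | zero =>
    intro a dp _ hInv
    rw [show a + ((0 : Nat) : Int) = a by simp, PySem.List.pyRange_one_eq_nil (le_refl a)]
    simpa using hInv
  | succ k ih =>
    intro a dp ha hInv
    rw [PySem.List.pyRange_one_cons (by push_cast; omega : a < a + ((k + 1 : Nat) : Int)),
        List.foldl_cons]
    have h1 := pvInnerInv arr a dp ha hInv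
    have h1' : pvInv arr (a + 1 - 1)
        ((PySem.List.pyRange 0 ((arr.length : Int) - a + 1) 1).foldl (pvStep arr a) dp) := by
      rwa [show a + 1 - 1 = a by ring]
    have h2 := ih (a + 1) ((PySem.List.pyRange 0 ((arr.length : Int) - a + 1) 1).foldl (pvStep arr a) dp) (by omega) h1'
    rw [show (a + 1) + (k : Int) = a + ((k + 1 : Nat) : Int) by push_cast; ring] at h2
    rw [show a - 1 + ((k + 1 : Nat) : Int) = a + 1 - 1 + (k : Int) by push_cast; ring]
    exact h2

theorem pvStage3_inv (arr : List Int) (h : arr ≠ []) :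
    pvInv arr (arr.length : Int) (pvStage3 arr) := by
  have hn : 1 ≤ (arr.length : Int) := by
    have : arr.length ≠ 0 := fun h0 => h (List.length_eq_zero_iff.mp h0)
    omega
  unfold pvStage3
  have h2 := pvStage2_inv arr
  by_cases hge : 2 ≤ (arr.length : Int)
  · have hout := pvOuter arr ((arr.length : Int) - 2).toNat 3 (pvStage2 arr) (by omega)
      (by simpa using h2)
    rw [show (3 : Int) + (((arr.length : Int) - 2).toNat : Int) = (arr.length : Int) + 1 by
          omega] at hout
    rw [show (3 : Int) - 1 + (((arr.length : Int) - 2).toNat : Int) = (arr.length : Int) by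
          omega] at hout
    exact hout
  · rw [PySem.List.pyRange_one_eq_nil (by omega : (arr.length : Int) + 1 ≤ 3), List.foldl_nil]
    intro i j hi hij hjn hlen
    exact h2 i j hi hij hjn (by omega)

-- ===== VERDICT (by name: the statement is the Claim_ definition above) =====
theorem maximumAmount_spec : Claim_equal_maximumAmount := by
  intro arr _ hpre
  unfold Spec_maximumAmount maximumAmount maximumAmount_alt
  have hn : 1 ≤ (arr.length : Int) := by
    have : arr.length ≠ 0 := fun h0 => hpre (List.length_eq_zero_iff.mp h0)
    omega
  exact pvStage3_inv arr hpre 0 ((arr.length : Int) - 1)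
    (by omega) (by omega) (by omega) (by omega)
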